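-- pv_equiv track=rewrite | github.com/TsyganenkoE/Homework | string.py | search_the_most_popular_word
-- ===== SOURCE A (Python) =====
-- def search_the_most_popular_word(all_words, res_list):
--     """searches for the max number of occurance of the word in the list of words occurances
--     and returns false if there are several words with this number and truth if there is one
--     such word """
--     max_repeat = max_index = i_index = 0
--     flg_err = True
--     word = all_words[i_index]
--     while i_index != len(all_words):
--         if max_repeat == res_list[i_index]:
--             if word != all_words[i_index]:
--                 flg_err = False
--         if max_repeat < res_list[i_index]:
--             max_repeat = res_list[i_index]
--             flg_err = True
--             word = all_words[i_index]
--             max_index = i_index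
--         i_index += 1
--     return max_index, flg_err
-- ===== SOURCE B (Python) =====
-- def search_the_most_popular_word(all_words, res_list):
--     m, idx = 0, 0
--     for i in range(len(all_words)):
--         if res_list[i] > m:
--             m, idx = res_list[i], i
--     top = all_words[idx]
--     unique = not any(res_list[i] == m and all_words[i] != top
--                      for i in range(len(all_words)))
--     return idx, unique
-- ===== Notes on version B (the rewrite author's own statement) =====
-- stated objective: simpler
-- what changed: Replaced A's single-pass state machine (running max plus a tracked 'word' and a flag that is reset on every new max) by two plain passes: an argmax fold giving (m, idx), then a closed-form uniqueness check 'no index has count m with a different word than all_words[idx]'.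
import Mathlib
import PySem

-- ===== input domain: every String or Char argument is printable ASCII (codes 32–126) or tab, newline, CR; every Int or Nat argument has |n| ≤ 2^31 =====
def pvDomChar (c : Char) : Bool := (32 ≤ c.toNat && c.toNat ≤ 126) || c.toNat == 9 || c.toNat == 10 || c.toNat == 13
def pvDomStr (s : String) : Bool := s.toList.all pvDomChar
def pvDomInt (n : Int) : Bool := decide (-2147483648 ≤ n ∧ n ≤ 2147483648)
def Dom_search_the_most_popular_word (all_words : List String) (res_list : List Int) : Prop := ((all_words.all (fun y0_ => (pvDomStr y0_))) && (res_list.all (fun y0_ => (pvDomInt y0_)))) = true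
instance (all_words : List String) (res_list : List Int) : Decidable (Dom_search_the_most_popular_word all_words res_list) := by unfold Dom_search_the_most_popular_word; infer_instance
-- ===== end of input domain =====

-- B replaces A's single-pass state machine (running max + tracked word + flag with resets)
-- by two passes: an argmax fold, then a closed-form uniqueness check (objective: simpler).

-- shared element reads: res_list[j] and all_words[j] for a loop counter j ≥ 0
def pvR (res_list : List Int) (j : Nat) : Int := (PySem.List.pyGet? res_list (j : Int)).getD 0
def pvW (all_words : List String) (j : Nat) : String := (PySem.List.pyGet? all_words (j : Int)).getD ""

-- ===== PORT A =====
-- A's while loop: state (max_repeat, max_index, flg_err, word), i_index counts up.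
-- max_index/i_index only ever hold loop-counter values ≥ 0, so they are carried as Nat.
-- The .getD defaults in pvR/pvW are never hit inside Pre_ (all indices are in range).
def pvAGo (all_words : List String) (res_list : List Int) (i : Nat)
    (max_repeat : Int) (max_index : Nat) (flg : Bool) (word : String) : Int × Bool :=
  if h : i < all_words.length then
    let flg1 := if max_repeat = pvR res_list i ∧ word ≠ pvW all_words i then false else flg
    if max_repeat < pvR res_list i then
      pvAGo all_words res_list (i + 1) (pvR res_list i) i true (pvW all_words i)
    else
      pvAGo all_words res_list (i + 1) max_repeat max_index flg1 word
  else
    ((max_index : Int), flg)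
termination_by all_words.length - i

def search_the_most_popular_word (all_words : List String) (res_list : List Int) : Int × Bool :=
  pvAGo all_words res_list 0 0 0 true (pvW all_words 0)

-- ===== PORT B =====
-- B's first loop: fold keeping (m, idx), strict '>' so the first occurrence of the max wins.
def pvBStep (res_list : List Int) (p : Int × Nat) (i : Nat) : Int × Nat :=
  if pvR res_list i > p.1 then (pvR res_list i, i) else p

def search_the_most_popular_word_alt (all_words : List String) (res_list : List Int) : Int × Bool :=
  let mi := (List.range all_words.length).foldl (pvBStep res_list) (0, 0)
  let top := pvW all_words mi.2
  let unique := ! (List.range all_words.length).any (fun i =>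
      (pvR res_list i == mi.1) && (pvW all_words i != top))
  ((mi.2 : Int), unique)

-- ===== PRECONDITION & SPEC =====
-- Pre_ is exactly where A returns: A raises IndexError on empty all_words (all_words[0])
-- and when res_list is shorter than all_words (res_list[i_index]).
def Pre_search_the_most_popular_word (all_words : List String) (res_list : List Int) : Prop :=
  all_words ≠ [] ∧ all_words.length ≤ res_list.length
instance (all_words : List String) (res_list : List Int) : Decidable (Pre_search_the_most_popular_word all_words res_list) := by unfold Pre_search_the_most_popular_word; infer_instance

def pvWitness_search_the_most_popular_word : List String × List Int := (["a", "b", "a"], [2, 1, 2])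

def Spec_search_the_most_popular_word (all_words : List String) (res_list : List Int) (out : Int × Bool) : Prop := out = search_the_most_popular_word_alt all_words res_list
instance (all_words : List String) (res_list : List Int) (out : Int × Bool) : Decidable (Spec_search_the_most_popular_word all_words res_list out) := by unfold Spec_search_the_most_popular_word; infer_instance

-- ===== CLAIM (what is proved, stated in full; the proofs are below) =====
def Claim_equal_search_the_most_popular_word : Prop := ∀ (all_words : List String) (res_list : List Int), Dom_search_the_most_popular_word all_words res_list → Pre_search_the_most_popular_word all_words res_list → Spec_search_the_most_popular_word all_words res_list (search_the_most_popular_word all_words res_list)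

-- ===== LEMMAS AND PROOFS =====

-- the (m, idx) invariant after the first i indices: m is the 0-floored running max,
-- idx its first attainment (or 0 if m = 0)
def pvInv (res_list : List Int) (i : Nat) (m : Int) (idx : Nat) : Prop :=
  (∀ j < i, pvR res_list j ≤ m) ∧
  ((m = 0 ∧ idx = 0) ∨ (0 < m ∧ idx < i ∧ pvR res_list idx = m ∧ ∀ j < idx, pvR res_list j < m))

theorem pvAGo_eq (all_words : List String) (res_list : List Int) :
    ∀ (i : Nat) (m : Int) (idx : Nat) (flg : Bool),
      i ≤ all_words.length →
      idx < all_words.length →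
      pvInv res_list i m idx →
      flg = ! (List.range i).any (fun j =>
        (pvR res_list j == m) && (pvW all_words j != pvW all_words idx)) →
      pvAGo all_words res_list i m idx flg (pvW all_words idx) =
        (let mi := (List.range' i (all_words.length - i)).foldl (pvBStep res_list) (m, idx)
         ((mi.2 : Int), ! (List.range all_words.length).any (fun j =>
            (pvR res_list j == mi.1) && (pvW all_words j != pvW all_words mi.2)))) := by
  intro i
  induction' hn : all_words.length - i using Nat.strong_induction_on with n IH generalizing i
  intro m idx flg hile hidx hinv hflg
  rw [pvAGo]
  by_cases h : i < all_words.length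
  · simp only [h, dif_pos]
    have hlt : all_words.length - (i + 1) < n := by omega
    have hrange : List.range' i (all_words.length - i) =
        i :: List.range' (i + 1) (all_words.length - (i + 1)) := by
      have : all_words.length - i = (all_words.length - (i + 1)) + 1 := by omega
      rw [this, List.range'_succ]
    rw [← hn, hrange]
    simp only [List.foldl_cons]
    by_cases hcmp : m < pvR res_list i
    · rw [if_pos hcmp]
      have hstep : pvBStep res_list (m, idx) i = (pvR res_list i, i) := by
        simp [pvBStep, hcmp]
      rw [hstep]
      refine IH _ hlt (i + 1) rfl (pvR res_list i) i true h h ?_ ?_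
      · constructor
        · intro j hj
          rcases Nat.lt_succ_iff_lt_or_eq.mp hj with hj' | hj'
          · exact le_of_lt (lt_of_le_of_lt (hinv.1 j hj') hcmp)
          · subst hj'; exact le_refl _
        · right
          refine ⟨?_, Nat.lt_succ_self i, rfl, ?_⟩
          · have h0 : (0 : Int) ≤ m := by
              rcases hinv.2 with ⟨hm, _⟩ | ⟨hm, _⟩
              · exact le_of_eq hm.symm
              · exact le_of_lt hm
            exact lt_of_le_of_lt h0 hcmp
          · intro j hj; exact lt_of_le_of_lt (hinv.1 j hj) hcmp
      · symm
        rw [Bool.not_eq_eq_eq_not, Bool.not_true, List.any_eq_false]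
        intro j hj
        simp only [List.mem_range] at hj
        rcases Nat.lt_succ_iff_lt_or_eq.mp hj with hj' | hj'
        · have hne : pvR res_list j ≠ pvR res_list i :=
            ne_of_lt (lt_of_le_of_lt (hinv.1 j hj') hcmp)
          simp [hne]
        · subst hj'; simp
    · rw [if_neg hcmp]
      have hstep : pvBStep res_list (m, idx) i = (m, idx) := by
        simp only [pvBStep, gt_iff_lt, if_neg hcmp]
      rw [hstep]
      have hflg1 : (if m = pvR res_list i ∧ pvW all_words idx ≠ pvW all_words i then false else flg) =
          ! (List.range (i + 1)).any (fun j =>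
            (pvR res_list j == m) && (pvW all_words j != pvW all_words idx)) := by
        rw [List.range_succ, List.any_append, Bool.not_or, hflg]
        simp only [List.any_cons, List.any_nil, Bool.or_false]
        by_cases hc : m = pvR res_list i ∧ pvW all_words idx ≠ pvW all_words i
        · rw [if_pos hc]
          have : ((pvR res_list i == m) && (pvW all_words i != pvW all_words idx)) = true := by
            simp [hc.1.symm]
            exact fun hcontra => absurd hcontra.symm hc.2
          rw [this]; simp
        · rw [if_neg hc]
          push Not at hc
          have : ((pvR res_list i == m) && (pvW all_words i != pvW all_words idx)) = false := by
            by_cases h1 : pvR res_list i = m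
            · have := hc h1.symm
              simp [h1, this]
            · simp [h1]
          rw [this]; simp
      rw [hflg1]
      exact IH _ hlt (i + 1) rfl m idx _ h hidx
        ⟨fun j hj => by
          rcases Nat.lt_succ_iff_lt_or_eq.mp hj with hj' | hj'
          · exact hinv.1 j hj'
          · subst hj'; exact le_of_not_gt hcmp,
         by
          rcases hinv.2 with h' | ⟨h1, h2, h3, h4⟩
          · exact Or.inl h'
          · exact Or.inr ⟨h1, Nat.lt_succ_of_lt h2, h3, h4⟩⟩ rfl
  · simp only [h, dif_neg, not_false_iff]
    have hi : i = all_words.length := by omega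
    have hz : n = 0 := by omega
    subst hz
    simp only [List.range'_zero, List.foldl_nil]
    subst hi
    rw [hflg]

-- ===== VERDICT (by name: the statement is the Claim_ definition above) =====
theorem search_the_most_popular_word_spec : Claim_equal_search_the_most_popular_word := by
  intro all_words res_list _ hpre
  unfold Spec_search_the_most_popular_word search_the_most_popular_word search_the_most_popular_word_alt
  have hlen : 0 < all_words.length := List.length_pos_of_ne_nil hpre.1
  rw [pvAGo_eq all_words res_list 0 0 0 true (Nat.zero_le _) hlen
    ⟨fun j hj => absurd hj (Nat.not_lt_zero j), Or.inl ⟨rfl, rfl⟩⟩ (by simp)]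
  simp only [Nat.sub_zero, ← List.range_eq_range']
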